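-- pv_equiv track=rewrite | github.com/corentinlunel/corentinlunel.github.io | Final_links_renamed.py | decoupe
-- ===== SOURCE A (Python) =====
-- def decoupe(l):
--
--     """découpe l en deux parties"""
--
--     m,n = [],[]
--     while len(l) > 1 :
--         m += [l.pop()]
--         n += [l.pop()]
--     if l !=[]:
--         m += [l.pop()]
--     return m,n
-- ===== SOURCE B (Python) =====
-- def decoupe(l):
--     """découpe l en deux parties"""
--     r = l[::-1]
--     m = r[0::2]
--     n = r[1::2]
--     l.clear()  # A empties l by popping; reproduce that side effect
--     return m, n
-- ===== Notes on version B (the rewrite author's own statement) =====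
-- stated objective: faster
-- what changed: Replaced the alternating pop() loop that builds m/n by repeated list concatenation with one reversed copy plus two strided slices r[0::2]/r[1::2] (l.clear() reproduces the emptying side effect).
import Mathlib
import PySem

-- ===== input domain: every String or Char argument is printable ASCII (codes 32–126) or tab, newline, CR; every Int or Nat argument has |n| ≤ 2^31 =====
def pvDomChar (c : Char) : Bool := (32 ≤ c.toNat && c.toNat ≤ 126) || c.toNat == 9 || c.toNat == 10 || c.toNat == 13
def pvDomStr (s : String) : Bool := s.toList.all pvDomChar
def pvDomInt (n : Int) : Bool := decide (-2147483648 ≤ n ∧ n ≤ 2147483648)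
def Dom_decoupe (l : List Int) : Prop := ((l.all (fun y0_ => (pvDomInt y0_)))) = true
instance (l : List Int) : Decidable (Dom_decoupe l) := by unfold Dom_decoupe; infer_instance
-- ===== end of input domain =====

-- B replaces A's alternating pop()-loop by a reversed copy and two strided slices (same emptying side effect on l; the proof is about the return value).


-- ===== PORT A =====
-- the while-loop: l.pop() removes and returns the last element (l.getLast!, l.dropLast)
def decoupeGo (l m n : List Int) : List Int × List Int :=
  if 1 < l.length then
    decoupeGo l.dropLast.dropLast (m ++ [l.getLast!]) (n ++ [l.dropLast.getLast!])
  else if l = [] then (m, n)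
  else (m ++ [l.getLast!], n)
termination_by l.length
decreasing_by simp_all [List.length_dropLast]; omega

def decoupe (l : List Int) : List Int × List Int := decoupeGo l [] []

-- ===== PORT B =====
-- hand port of the stride-2 slices r[0::2] (everyOther r) and r[1::2] (everyOther r.tail);
-- exact for start 0 resp. 1 with step 2 on any list
def everyOther : List Int → List Int
  | [] => []
  | [a] => [a]
  | a :: _ :: t => a :: everyOther t

def decoupe_alt (l : List Int) : List Int × List Int :=
  let r := (PySem.List.slice? l none none (-1)).getD []   -- l[::-1]
  (everyOther r, everyOther r.tail)

-- ===== PRECONDITION & SPEC =====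
def Spec_decoupe (l : List Int) (out : List Int × List Int) : Prop := out = decoupe_alt l
instance (l : List Int) (out : List Int × List Int) : Decidable (Spec_decoupe l out) := by unfold Spec_decoupe; infer_instance

-- ===== CLAIM (what is proved, stated in full; the proofs are below) =====
def Claim_equal_decoupe : Prop := ∀ (l : List Int), Dom_decoupe l → Spec_decoupe l (decoupe l)

-- ===== LEMMAS AND PROOFS =====
lemma everyOther_cons (x : Int) (xs : List Int) :
    everyOther (x :: xs) = x :: everyOther xs.tail := by
  cases xs <;> simp [everyOther]

lemma getLast!_eq_getLast (l : List Int) (h : l ≠ []) : l.getLast! = l.getLast h := by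
  cases l with
  | nil => exact absurd rfl h
  | cons a t => rfl

lemma reverse_of_ne_nil (l : List Int) (h : l ≠ []) :
    l.reverse = l.getLast! :: l.dropLast.reverse := by
  rw [getLast!_eq_getLast l h]
  conv_lhs => rw [← List.dropLast_concat_getLast h]
  simp

lemma go_eq (l m n : List Int) :
    decoupeGo l m n = (m ++ everyOther l.reverse, n ++ everyOther l.reverse.tail) := by
  induction l, m, n using decoupeGo.induct with
  | case1 l m n h ih =>
    have hne : l ≠ [] := by intro e; simp [e] at h
    have hne2 : l.dropLast ≠ [] := by
      intro e
      have := congrArg List.length e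
      simp [List.length_dropLast] at this
      omega
    rw [decoupeGo, if_pos h, ih]
    rw [reverse_of_ne_nil l hne, reverse_of_ne_nil l.dropLast hne2]
    simp [everyOther_cons]
  | case2 m n h =>
    rw [decoupeGo]
    simp [everyOther]
  | case3 l m n h he =>
    have h1 : l.length = 1 := by
      have : l.length ≠ 0 := by simpa using he
      omega
    obtain ⟨a, ha⟩ : ∃ a, l = [a] := by
      cases l with
      | nil => simp at h1
      | cons x t => cases t with
        | nil => exact ⟨x, rfl⟩
        | cons y u => simp at h1
    rw [decoupeGo, if_neg h, if_neg he]
    simp [ha, everyOther]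

-- ===== VERDICT (by name: the statement is the Claim_ definition above) =====
theorem decoupe_spec : Claim_equal_decoupe := by
  intro l _
  unfold Spec_decoupe decoupe decoupe_alt
  rw [go_eq]
  simp [PySem.List.slice?_none_none_neg_one]
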